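-- pv_equiv track=rewrite | github.com/eliottcassidy2000/math | 04-computation/savchenko_verify.py | is_doubly_regular
-- ===== SOURCE A (Python) =====
-- def is_doubly_regular(T):
--     """Check DRT: regular + every pair has (n-3)/4 common out-neighbors."""
--     n = len(T)
--     if n % 4 != 3:
--         return False
--     d = (n - 1) // 2
--     if not all(sum(T[i]) == d for i in range(n)):
--         return False
--     lam = (n - 3) // 4
--     for i in range(n):
--         for j in range(i + 1, n):
--             common = sum(1 for k in range(n) if k != i and k != j and T[i][k] and T[j][k])
--             if common != lam:
--                 return False
--     return True
-- ===== SOURCE B (Python) =====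
-- def is_doubly_regular(T):
--     """Check DRT: regular + every pair has (n-3)/4 common out-neighbors.
--     Bitset variant: one mask per row (own bit cleared), common = popcount of AND."""
--     n = len(T)
--     if n % 4 != 3:
--         return False
--     d = (n - 1) // 2
--     masks = []
--     for r, row in enumerate(T):
--         if sum(row) != d:
--             return False
--         m = 0
--         for k, x in enumerate(row[:n]):
--             if x and k != r:
--                 m |= 1 << k
--         masks.append(m)
--     lam = (n - 3) // 4
--     for i in range(n):
--         for j in range(i + 1, n):
--             if (masks[i] & masks[j]).bit_count() != lam:
--                 return False
--     return True
-- ===== Notes on version B (the rewrite author's own statement) =====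
-- stated objective: alternative
-- what changed: Replaces A's scalar inner loop per pair (counting common out-neighbors index by index) with one bitmask per row built in a single pass (row's own bit cleared), so each pair is checked by a single AND plus popcount.
-- outside the precondition, e.g. on is_doubly_regular([[0, 0, 1], [0, 0, 1], [1]]): A returns False, B returns False
import Mathlib
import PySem

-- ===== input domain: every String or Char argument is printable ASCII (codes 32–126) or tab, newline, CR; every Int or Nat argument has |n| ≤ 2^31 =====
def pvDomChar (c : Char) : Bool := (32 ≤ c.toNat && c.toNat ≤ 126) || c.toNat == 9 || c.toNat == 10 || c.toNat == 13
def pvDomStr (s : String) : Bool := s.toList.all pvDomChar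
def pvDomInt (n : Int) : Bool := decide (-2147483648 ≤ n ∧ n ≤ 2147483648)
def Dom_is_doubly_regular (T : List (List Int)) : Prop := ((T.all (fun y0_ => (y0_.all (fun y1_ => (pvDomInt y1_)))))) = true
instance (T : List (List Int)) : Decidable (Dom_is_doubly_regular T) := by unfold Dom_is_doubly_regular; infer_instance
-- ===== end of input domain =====

-- B replaces A's scalar inner loop over common out-neighbours by one bitmask per row
-- (own bit cleared) and a popcount of the AND per pair (objective: alternative algorithm).

-- ===== PORT A =====
-- T[i][k] indexing is total here via getD; Pre_ guarantees every index A actually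
-- reads is in range (Python raises IndexError on the excluded short-row inputs).
def is_doubly_regular (T : List (List Int)) : Bool :=
  let n := T.length
  if PySem.Int.mod (n : Int) 4 ≠ 3 then false
  else
    let d : Int := PySem.Int.floordiv ((n : Int) - 1) 2
    if ¬ ((List.range n).all fun i => (T.getD i []).sum == d) then false
    else
      let lam : Int := PySem.Int.floordiv ((n : Int) - 3) 4
      (List.range n).all fun i =>
        (List.range' (i + 1) (n - (i + 1))).all fun j =>
          (((List.range n).countP fun k =>
              decide (k ≠ i) && decide (k ≠ j) &&
              ((T.getD i []).getD k 0 != 0) && ((T.getD j []).getD k 0 != 0) : Int)) == lam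

-- ===== PORT B =====
-- mask of row r: bit k set iff row[:n][k] is truthy and k ≠ r
-- (Python's `for k, x in enumerate(row[:n])` ported by hand as a fold over (row.take n).zipIdx,
--  exact since n = len(T) ≥ 0 and zipIdx pairs each element with its index from 0).
def pvRowMask (n r : Nat) (row : List Int) : Nat :=
  (row.take n).zipIdx.foldl
    (fun (m : Nat) (xk : Int × Nat) => if xk.1 ≠ 0 ∧ xk.2 ≠ r then m ||| (1 <<< xk.2) else m) 0

-- the single pass over rows: early None on a row with a wrong out-degree, else the mask list
def pvBuildMasks (n : Nat) (d : Int) (r : Nat) : List (List Int) → Option (List Nat)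
  | [] => some []
  | row :: rs =>
      if row.sum ≠ d then none
      else (pvBuildMasks n d (r + 1) rs).map (pvRowMask n r row :: ·)

def is_doubly_regular_alt (T : List (List Int)) : Bool :=
  let n := T.length
  if PySem.Int.mod (n : Int) 4 ≠ 3 then false
  else
    let d : Int := PySem.Int.floordiv ((n : Int) - 1) 2
    match pvBuildMasks n d 0 T with
    | none => false
    | some masks =>
      let lam : Int := PySem.Int.floordiv ((n : Int) - 3) 4
      (List.range n).all fun i =>
        (List.range' (i + 1) (n - (i + 1))).all fun j =>
          ((PySem.Int.bitCount ((masks.getD i 0 &&& masks.getD j 0 : Nat) : Int) : Int)) == lam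

-- ===== PRECONDITION & SPEC =====
-- Pre_ excludes matrices containing a row shorter than n that pass the size and
-- out-degree checks: on those A's pair scan raises IndexError (or, rarely, happens to
-- return False at an earlier pair before touching the short row, which B also does).
def Pre_is_doubly_regular (T : List (List Int)) : Prop :=
  PySem.Int.mod (T.length : Int) 4 ≠ 3
  ∨ (∃ row ∈ T, row.sum ≠ PySem.Int.floordiv ((T.length : Int) - 1) 2)
  ∨ (∀ row ∈ T, T.length ≤ row.length)
instance (T : List (List Int)) : Decidable (Pre_is_doubly_regular T) := by
  unfold Pre_is_doubly_regular; infer_instance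

def pvWitness_is_doubly_regular : List (List Int) := [[0, 1, 0], [0, 0, 1], [1, 0, 0]]

def Spec_is_doubly_regular (T : List (List Int)) (out : Bool) : Prop := out = is_doubly_regular_alt T
instance (T : List (List Int)) (out : Bool) : Decidable (Spec_is_doubly_regular T out) := by
  unfold Spec_is_doubly_regular; infer_instance

-- ===== CLAIM (what is proved, stated in full; the proofs are below) =====
def Claim_equal_is_doubly_regular : Prop :=
  ∀ (T : List (List Int)), Dom_is_doubly_regular T → Pre_is_doubly_regular T →
    Spec_is_doubly_regular T (is_doubly_regular T)

-- ===== LEMMAS AND PROOFS =====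

-- testBit of the mask-building fold
theorem pv_testBit_foldl (l : List (Int × Nat)) (m0 : Nat) (r t : Nat) :
    ((l.foldl (fun (m : Nat) (xk : Int × Nat) => if xk.1 ≠ 0 ∧ xk.2 ≠ r then m ||| (1 <<< xk.2) else m) m0).testBit t)
    = (m0.testBit t || l.any fun xk => decide (xk.2 = t) && decide (xk.1 ≠ 0) && decide (xk.2 ≠ r)) := by
  induction l generalizing m0 with
  | nil => simp
  | cons x xs ih =>
      simp only [List.foldl_cons, List.any_cons, ih]
      by_cases h : x.1 ≠ 0 ∧ x.2 ≠ r
      · rw [if_pos h]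
        simp [Nat.testBit_or, Nat.one_shiftLeft, Nat.testBit_two_pow, h.1, h.2, Bool.or_assoc]
      · rw [if_neg h]
        rcases not_and_or.mp h with h1 | h2
        · simp only [ne_eq, not_not] at h1
          simp [h1]
        · simp only [ne_eq, not_not] at h2
          simp [h2]

theorem pv_testBit_rowMask (n r : Nat) (row : List Int) (t : Nat) :
    (pvRowMask n r row).testBit t
    = (decide (t < n) && decide (t < row.length) && (row.getD t 0 != 0) && decide (t ≠ r)) := by
  unfold pvRowMask
  rw [pv_testBit_foldl]
  simp only [Nat.zero_testBit, Bool.false_or]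
  rw [Bool.eq_iff_iff]
  simp only [List.any_eq_true, Bool.and_eq_true, decide_eq_true_eq, bne_iff_ne, ne_eq]
  constructor
  · rintro ⟨⟨x, k⟩, hmem, ⟨⟨hkt, hx⟩, hkr⟩⟩
    rw [List.mem_zipIdx_iff_getElem?] at hmem
    simp only at hmem hkt hx hkr
    rw [hkt] at hmem
    obtain ⟨hlt, hx_eq⟩ := List.getElem?_eq_some_iff.mp hmem
    have hlt' := hlt
    simp only [List.length_take, lt_min_iff] at hlt'
    refine ⟨⟨⟨hlt'.1, hlt'.2⟩, ?_⟩, hkt ▸ hkr⟩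
    rw [List.getD_eq_getElem row 0 hlt'.2]
    have : row[t]'hlt'.2 = x := by rw [← hx_eq, List.getElem_take]
    rw [this]; exact hx
  · rintro ⟨⟨⟨h1, h2⟩, hx⟩, hr⟩
    refine ⟨(row[t]'h2, t), ?_, ⟨⟨rfl, ?_⟩, hr⟩⟩
    · rw [List.mem_zipIdx_iff_getElem?]
      simp only
      rw [List.getElem?_take_of_lt h1, List.getElem?_eq_getElem h2]
    · simp only
      rw [List.getD_eq_getElem row 0 h2] at hx
      exact hx

-- bitCount of a Nat = number of set bits below any bound covering them
theorem pv_bitCount_countP (B : Nat) : ∀ (m : Nat), (∀ t, m.testBit t = true → t < B) →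
    PySem.Int.bitCount (m : Int) = (List.range B).countP m.testBit := by
  induction B with
  | zero =>
      intro m hm
      have hz : m = 0 := by
        apply Nat.eq_of_testBit_eq
        intro i
        simp only [Nat.zero_testBit]
        by_contra hc
        simp only [Bool.not_eq_false] at hc
        exact absurd (hm i hc) (Nat.not_lt_zero i)
      simp [hz, PySem.Int.bitCount_zero]
  | succ B ih =>
      intro m hm
      by_cases h0 : m = 0
      · rw [h0]
        simp only [Nat.cast_zero, PySem.Int.bitCount_zero]
        rw [eq_comm, List.countP_eq_zero]
        intro a _
        simp [Nat.zero_testBit]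
      · rw [PySem.Int.bitCount_natCast (Nat.pos_of_ne_zero h0)]
        have hhalf : ∀ t, (m / 2).testBit t = true → t < B := by
          intro t ht
          have := hm (t + 1) (by rwa [Nat.testBit_add_one])
          omega
        rw [ih (m / 2) hhalf]
        rw [List.range_succ_eq_map, List.countP_cons, List.countP_map]
        have hcomp : (m.testBit ∘ Nat.succ) = (m / 2).testBit := by
          funext t; simp [Function.comp, Nat.testBit_add_one]
        rw [hcomp]
        rw [Nat.testBit_zero]
        rcases Nat.mod_two_eq_zero_or_one m with h2 | h2 <;> simp [h2] <;> omega

-- the mask list produced by the single pass, pointwise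
theorem pv_buildMasks_some (n : Nat) (d : Int) :
    ∀ (rows : List (List Int)) (r : Nat), (∀ row ∈ rows, row.sum = d) →
      pvBuildMasks n d r rows
        = some ((List.range rows.length).map fun i => pvRowMask n (r + i) (rows.getD i [])) := by
  intro rows
  induction rows with
  | nil => intro r _; simp [pvBuildMasks]
  | cons row rs ih =>
      intro r hall
      have h0 : row.sum = d := hall row (by simp)
      simp only [pvBuildMasks]
      rw [if_neg (by simp [h0])]
      rw [ih (r + 1) (fun x hx => hall x (by simp [hx]))]
      simp only [Option.map_some, Option.some.injEq, List.length_cons]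
      rw [List.range_succ_eq_map, List.map_cons, List.map_map]
      congr 1
      simp only [List.map_inj_left, List.mem_range, Function.comp_apply,
        List.getD_cons_succ]
      intro a ha
      congr 1
      omega

theorem pv_buildMasks_none (n : Nat) (d : Int) :
    ∀ (rows : List (List Int)) (r : Nat),
      (pvBuildMasks n d r rows = none ↔ ∃ row ∈ rows, row.sum ≠ d) := by
  intro rows
  induction rows with
  | nil => intro r; simp [pvBuildMasks]
  | cons row rs ih =>
      intro r
      by_cases h : row.sum = d
      · simp only [pvBuildMasks]
        rw [if_neg (by simp [h])]
        simp only [Option.map_eq_none_iff, ih (r + 1)]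
        simp [h]
      · simp only [pvBuildMasks]
        rw [if_pos (by simp [h])]
        simp [h]

-- A's row-sum check as a statement about the rows
theorem pv_sum_all (T : List (List Int)) (d : Int) :
    ((List.range T.length).all fun i => (T.getD i []).sum == d) = true
      ↔ ∀ row ∈ T, row.sum = d := by
  simp only [List.all_eq_true, List.mem_range, beq_iff_eq]
  constructor
  · intro h row hrow
    obtain ⟨i, hi, rfl⟩ := List.getElem_of_mem hrow
    have := h i hi
    rwa [List.getD_eq_getElem T [] hi] at this
  · intro h i hi
    rw [List.getD_eq_getElem T [] hi]
    exact h _ (List.getElem_mem hi)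

-- the heart: popcount of the AND of two masks = A's common-out-neighbour count
theorem pv_common_eq (T : List (List Int)) (i j : Nat)
    (hi : i < T.length) (hj : j < T.length)
    (hlong : ∀ row ∈ T, T.length ≤ row.length) :
    PySem.Int.bitCount
        ((pvRowMask T.length i (T.getD i []) &&& pvRowMask T.length j (T.getD j []) : Nat) : Int)
      = (List.range T.length).countP fun k =>
          decide (k ≠ i) && decide (k ≠ j) &&
          ((T.getD i []).getD k 0 != 0) && ((T.getD j []).getD k 0 != 0) := by
  set n := T.length with hn
  have hli : n ≤ (T.getD i []).length := by
    rw [List.getD_eq_getElem T [] hi]; exact hlong _ (List.getElem_mem hi)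
  have hlj : n ≤ (T.getD j []).length := by
    rw [List.getD_eq_getElem T [] hj]; exact hlong _ (List.getElem_mem hj)
  have hbit : ∀ t, ((pvRowMask n i (T.getD i []) &&& pvRowMask n j (T.getD j []))).testBit t
      = (decide (t < n) && decide (t ≠ i) && decide (t ≠ j) &&
         ((T.getD i []).getD t 0 != 0) && ((T.getD j []).getD t 0 != 0)) := by
    intro t
    rw [Nat.testBit_and, pv_testBit_rowMask, pv_testBit_rowMask]
    by_cases h1 : t < n
    · have h2 : t < (T.getD i []).length := lt_of_lt_of_le h1 hli
      have h3 : t < (T.getD j []).length := lt_of_lt_of_le h1 hlj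
      simp only [h1, h2, h3, decide_true, Bool.true_and]
      by_cases hzi : (T.getD i []).getD t 0 = 0 <;>
        by_cases hzj : (T.getD j []).getD t 0 = 0 <;>
          by_cases hti : t = i <;> by_cases htj : t = j <;>
            simp [hti, htj]
    · simp [h1]
  have hlt : ∀ t, ((pvRowMask n i (T.getD i []) &&& pvRowMask n j (T.getD j []))).testBit t = true
      → t < n := by
    intro t ht
    rw [hbit t] at ht
    by_contra hc
    simp [hc] at ht
  rw [pv_bitCount_countP n _ hlt]
  apply List.countP_congr
  intro t htmem
  rw [List.mem_range] at htmem
  rw [hbit t]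
  simp [htmem]

-- Bool-valued `all` congruence over the members of the list
theorem pv_all_congr {α : Type} (l : List α) (p q : α → Bool)
    (h : ∀ a ∈ l, p a = q a) : l.all p = l.all q := by
  induction l with
  | nil => rfl
  | cons x xs ih =>
      simp only [List.all_cons, h x (by simp), ih (fun a ha => h a (by simp [ha]))]

-- ===== VERDICT (by name: the statement is the Claim_ definition above) =====
theorem is_doubly_regular_spec : Claim_equal_is_doubly_regular := by
  intro T _ hpre
  unfold Spec_is_doubly_regular is_doubly_regular is_doubly_regular_alt
  by_cases hmod : PySem.Int.mod (T.length : Int) 4 ≠ 3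
  · rw [if_pos hmod, if_pos hmod]
  · rw [if_neg hmod, if_neg hmod]
    dsimp only
    set d : Int := PySem.Int.floordiv ((T.length : Int) - 1) 2 with hd
    by_cases hbad : ∃ row ∈ T, row.sum ≠ d
    · have hall : ¬ ((List.range T.length).all fun i => (T.getD i []).sum == d) = true := by
        intro hc
        obtain ⟨row, hrow, hne⟩ := hbad
        exact hne ((pv_sum_all T d).mp hc row hrow)
      rw [if_pos hall]
      rw [(pv_buildMasks_none T.length d T 0).mpr hbad]
    · have hgood : ∀ row ∈ T, row.sum = d := fun row hrow => by
        by_contra hc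
        exact hbad ⟨row, hrow, hc⟩
      have hlong : ∀ row ∈ T, T.length ≤ row.length := by
        rcases hpre with h | h | h
        · exact absurd h hmod
        · obtain ⟨row, hrow, hne⟩ := h
          exact absurd (hgood row hrow) hne
        · exact h
      rw [if_neg (not_not_intro ((pv_sum_all T d).mpr hgood))]
      rw [pv_buildMasks_some T.length d T 0 hgood]
      apply pv_all_congr
      intro i hi
      rw [List.mem_range] at hi
      apply pv_all_congr
      intro j hj
      have hjlt : j < T.length := by
        rw [List.mem_range'] at hj
        obtain ⟨k, hk, rfl⟩ := hj
        omega
      have hmi : ((List.range T.length).map fun k =>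
          pvRowMask T.length (0 + k) (T.getD k [])).getD i 0
            = pvRowMask T.length i (T.getD i []) := by
        rw [List.getD_eq_getElem _ 0 (by simpa using hi)]
        simp
      have hmj : ((List.range T.length).map fun k =>
          pvRowMask T.length (0 + k) (T.getD k [])).getD j 0
            = pvRowMask T.length j (T.getD j []) := by
        rw [List.getD_eq_getElem _ 0 (by simpa using hjlt)]
        simp
      rw [hmi, hmj, pv_common_eq T i j hi hjlt hlong]
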